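-- pv_equiv track=rewrite | github.com/morehosseini/teaching-tools | agent-pm/app/core/validation_engine.py | _has_transitive_predecessor
-- ===== SOURCE A (Python) =====
-- def _has_transitive_predecessor(
--     activity_id: str,
--     required_predecessor_ids: set[str],
--     predecessors_by_activity: dict[str, set[str]],
-- ) -> bool:
--     """Return true if any required predecessor appears upstream of activity_id."""
--     seen = set()
--     stack = list(predecessors_by_activity.get(activity_id, set()))
--
--     while stack:
--         pred_id = stack.pop()
--         if pred_id in required_predecessor_ids:
--             return True
--         if pred_id in seen:
--             continue
--         seen.add(pred_id)
--         stack.extend(predecessors_by_activity.get(pred_id, set()))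
--
--     return False
-- ===== SOURCE B (Python) =====
-- def _has_transitive_predecessor(
--     activity_id: str,
--     required_predecessor_ids: set[str],
--     predecessors_by_activity: dict[str, set[str]],
-- ) -> bool:
--     """Saturate the set of transitive predecessors level by level, then test it."""
--     reachable = set(predecessors_by_activity.get(activity_id, set()))
--     while True:
--         expanded = set(reachable)
--         for node in reachable:
--             expanded |= predecessors_by_activity.get(node, set())
--         if expanded == reachable:
--             break
--         reachable = expanded
--     return not required_predecessor_ids.isdisjoint(reachable)
-- ===== Notes on version B (the rewrite author's own statement) =====
-- stated objective: alternative
-- what changed: Replaces the explicit DFS stack/seen worklist with a level-synchronized saturation: repeatedly union every known node's predecessor set into one reachable set until it stops growing, then test it against the required ids in one pass.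
import Mathlib
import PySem

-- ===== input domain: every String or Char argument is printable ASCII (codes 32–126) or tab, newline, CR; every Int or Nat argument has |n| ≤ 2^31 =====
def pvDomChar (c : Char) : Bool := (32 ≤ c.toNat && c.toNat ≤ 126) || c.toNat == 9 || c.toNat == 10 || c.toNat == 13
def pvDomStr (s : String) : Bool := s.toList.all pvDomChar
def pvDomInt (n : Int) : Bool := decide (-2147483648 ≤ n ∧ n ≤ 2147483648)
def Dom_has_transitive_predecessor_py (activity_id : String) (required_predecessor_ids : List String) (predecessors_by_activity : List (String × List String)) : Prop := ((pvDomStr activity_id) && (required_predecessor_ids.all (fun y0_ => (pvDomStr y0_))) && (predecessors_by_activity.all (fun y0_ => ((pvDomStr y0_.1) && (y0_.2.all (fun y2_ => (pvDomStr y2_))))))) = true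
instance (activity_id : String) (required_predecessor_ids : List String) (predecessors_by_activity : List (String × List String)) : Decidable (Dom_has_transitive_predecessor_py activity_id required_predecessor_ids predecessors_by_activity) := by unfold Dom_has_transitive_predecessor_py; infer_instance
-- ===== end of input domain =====

-- B replaces A's DFS stack/seen worklist by level-synchronized saturation of the reachable
-- set to a fixpoint, then one disjointness test (objective: alternative, same result).


-- ===== PORT A =====
-- predecessors_by_activity.get(x, set())  (first-match association-list lookup)
def pvAdj (d : List (String × List String)) (x : String) : List String :=
  (PySem.Dict.mk d).getD x []

-- total number of listed predecessor ids (used only to size the fuel of the loops)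
def pvEdges (d : List (String × List String)) : Nat :=
  (d.map (fun p => p.2.length)).sum

-- A's while-loop: pop from the end, check required, skip seen, else mark and extend.
-- The fuel argument only makes the loop total; the proof shows it never runs out.
def pvLoopA (d : List (String × List String)) (req : List String) :
    Nat → PySem.Set String → List String → Bool
  | 0, _, _ => false
  | fuel+1, seen, stack =>
    match stack.getLast? with
    | none => false
    | some pred =>
      let stack' := stack.dropLast
      if req.contains pred then true
      else if seen.contains pred then pvLoopA d req fuel seen stack'
      else pvLoopA d req fuel (seen.add pred) (stack' ++ pvAdj d pred)

def has_transitive_predecessor_py (activity_id : String) (required_predecessor_ids : List String) (predecessors_by_activity : List (String × List String)) : Bool :=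
  let stack := pvAdj predecessors_by_activity activity_id
  pvLoopA predecessors_by_activity required_predecessor_ids
    ((pvEdges predecessors_by_activity + 1) * (pvEdges predecessors_by_activity + 2) + stack.length + 1)
    PySem.Set.empty stack

-- ===== PORT B =====
-- one saturation round: expanded = set(reachable); for node in reachable: expanded |= get(node, set())
def pvStep (d : List (String × List String)) (r : PySem.Set String) : PySem.Set String :=
  r.foldl (fun acc node => acc.union (pvAdj d node)) (PySem.Set.ofList r)

-- B's while-True loop; fuel only makes it total, the proof shows the fixpoint is
-- reached before it runs out.
def pvLoopB (d : List (String × List String)) : Nat → PySem.Set String → PySem.Set String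
  | 0, r => r
  | fuel+1, r =>
    let expanded := pvStep d r
    if PySem.Set.equal expanded r then r
    else pvLoopB d fuel expanded

def has_transitive_predecessor_py_alt (activity_id : String) (required_predecessor_ids : List String) (predecessors_by_activity : List (String × List String)) : Bool :=
  let reachable := pvLoopB predecessors_by_activity (pvEdges predecessors_by_activity + 1)
    (PySem.Set.ofList (pvAdj predecessors_by_activity activity_id))
  !(PySem.Set.isdisjoint (PySem.Set.ofList required_predecessor_ids) reachable)

-- ===== PRECONDITION & SPEC =====
def Spec_has_transitive_predecessor_py (activity_id : String) (required_predecessor_ids : List String) (predecessors_by_activity : List (String × List String)) (out : Bool) : Prop := out = has_transitive_predecessor_py_alt activity_id required_predecessor_ids predecessors_by_activity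
instance (activity_id : String) (required_predecessor_ids : List String) (predecessors_by_activity : List (String × List String)) (out : Bool) : Decidable (Spec_has_transitive_predecessor_py activity_id required_predecessor_ids predecessors_by_activity out) := by unfold Spec_has_transitive_predecessor_py; infer_instance

-- ===== CLAIM (what is proved, stated in full; the proofs are below) =====
def Claim_equal_has_transitive_predecessor_py : Prop := ∀ (activity_id : String) (required_predecessor_ids : List String) (predecessors_by_activity : List (String × List String)), Dom_has_transitive_predecessor_py activity_id required_predecessor_ids predecessors_by_activity → Spec_has_transitive_predecessor_py activity_id required_predecessor_ids predecessors_by_activity (has_transitive_predecessor_py activity_id required_predecessor_ids predecessors_by_activity)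

-- ===== LEMMAS AND PROOFS =====

-- the predecessor edge relation and reachability through it
def pvEdge (d : List (String × List String)) (x y : String) : Prop := y ∈ pvAdj d x

def pvRTG (d : List (String × List String)) : String → String → Prop :=
  Relation.ReflTransGen (pvEdge d)

-- "some required id is reachable in ≥ 1 steps from a"
def pvGoal (d : List (String × List String)) (req : List String) (a : String) : Prop :=
  ∃ r, r ∈ req ∧ ∃ z ∈ pvAdj d a, pvRTG d z r

-- all ids that ever appear as a listed predecessor
def pvVals (d : List (String × List String)) : List String := (d.map (fun p => p.2)).flatten

lemma pvAdj_cases (d : List (String × List String)) (x : String) :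
    pvAdj d x = [] ∨ ∃ p ∈ d, pvAdj d x = p.2 := by
  unfold pvAdj PySem.Dict.getD PySem.Dict.get?
  cases h : List.find? (fun p => p.1 == x) (PySem.Dict.mk d).items with
  | none => left; rfl
  | some p => exact Or.inr ⟨p, List.mem_of_find?_eq_some h, rfl⟩

lemma pvAdj_sub_vals (d : List (String × List String)) (x y : String) (h : y ∈ pvAdj d x) :
    y ∈ pvVals d := by
  rcases pvAdj_cases d x with he | ⟨p, hp, he⟩
  · simp [he] at h
  · rw [he] at h
    exact List.mem_flatten.2 ⟨p.2, List.mem_map.2 ⟨p, hp, rfl⟩, h⟩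

lemma pvAdj_len_le (d : List (String × List String)) (x : String) :
    (pvAdj d x).length ≤ pvEdges d := by
  rcases pvAdj_cases d x with he | ⟨p, hp, he⟩
  · simp [he]
  · rw [he]
    exact List.single_le_sum (fun _ _ => Nat.zero_le _) _ (List.mem_map.2 ⟨p, hp, rfl⟩)

lemma pvVals_len (d : List (String × List String)) : (pvVals d).length = pvEdges d := by
  unfold pvVals pvEdges
  rw [List.length_flatten, List.map_map]
  rfl

-- strict decrease of |V \ s| when s grows by an element of V
lemma pv_filter_lt {α : Type} [DecidableEq α] (V s s' : List α)
    (hsub : ∀ x ∈ s, x ∈ s') (v : α) (hvV : v ∈ V) (hvs' : v ∈ s') (hvs : v ∉ s) :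
    (V.filter (fun x => decide (x ∉ s'))).length < (V.filter (fun x => decide (x ∉ s))).length := by
  have mono : ∀ (L : List α), (L.filter (fun x => decide (x ∉ s'))).length ≤ (L.filter (fun x => decide (x ∉ s))).length := by
    intro L
    rw [← List.countP_eq_length_filter, ← List.countP_eq_length_filter]
    exact List.countP_mono_left (fun x _ hx => by
      simp only [decide_eq_true_eq] at hx ⊢
      exact fun hxs => hx (hsub x hxs))
  induction V with
  | nil => cases hvV
  | cons a tl ih =>
    rcases List.mem_cons.1 hvV with rfl | hvtl
    · simp only [List.filter_cons, decide_eq_true_eq]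
      rw [if_neg (by simp [hvs']), if_pos hvs]
      simp only [List.length_cons]
      exact Nat.lt_succ_of_le (mono tl)
    · have htl := ih hvtl
      simp only [List.filter_cons, decide_eq_true_eq]
      by_cases h1 : a ∈ s'
      · rw [if_neg (by simp [h1])]
        by_cases h2 : a ∈ s
        · rw [if_neg (by simp [h2])]; exact htl
        · rw [if_pos (by simp [h2])]; simp only [List.length_cons]; omega
      · have h2 : a ∉ s := fun h => h1 (hsub a h)
        rw [if_pos (by simp [h1]), if_pos (by simp [h2])]
        simp only [List.length_cons]; omega

-- escape lemma: a path from inside seen to a required id must pass through the stack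
lemma pv_escape (d : List (String × List String)) (req : List String)
    (seen : PySem.Set String) (stack : List String)
    (hcl : ∀ x ∈ seen, ∀ y ∈ pvAdj d x, y ∈ seen ∨ y ∈ stack)
    (hreq : ∀ x ∈ seen, x ∉ req) :
    ∀ x r, pvRTG d x r → r ∈ req → x ∈ seen → ∃ s ∈ stack, pvRTG d s r := by
  intro x r hxr
  induction hxr using Relation.ReflTransGen.head_induction_on with
  | refl => intro hr hs; exact absurd hr (hreq _ hs)
  | head e htail ih =>
    intro hr hs
    rcases hcl _ hs _ e with hc | hc
    · exact ih hr hc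
    · exact ⟨_, hc, htail⟩

def pvMeasureA (d : List (String × List String)) (seen : PySem.Set String) (stack : List String) : Nat :=
  ((PySem.Set.ofList (pvVals d)).filter (fun v => decide (v ∉ seen))).length * (pvEdges d + 2)
    + stack.length + 1

lemma pvLoopA_concat (d : List (String × List String)) (req : List String)
    (fuel : Nat) (seen : PySem.Set String) (ys : List String) (pred : String) :
    pvLoopA d req (fuel + 1) seen (ys ++ [pred]) =
      if req.contains pred then true
      else if seen.contains pred then pvLoopA d req fuel seen ys
      else pvLoopA d req fuel (seen.add pred) (ys ++ pvAdj d pred) := by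
  simp [pvLoopA]

lemma pvLoopA_correct (d : List (String × List String)) (req : List String) :
    ∀ (fuel : Nat) (seen : PySem.Set String) (stack : List String),
      (∀ x ∈ seen, ∀ y ∈ pvAdj d x, y ∈ seen ∨ y ∈ stack) →
      (∀ x ∈ seen, x ∉ req) →
      (∀ s ∈ stack, s ∈ pvVals d) →
      pvMeasureA d seen stack ≤ fuel →
      (pvLoopA d req fuel seen stack = true ↔ ∃ r, r ∈ req ∧ ∃ s ∈ stack, pvRTG d s r) := by
  intro fuel
  induction fuel with
  | zero => intro seen stack _ _ _ hf; unfold pvMeasureA at hf; omega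
  | succ fuel ih =>
    intro seen stack hcl hreqs hvals hf
    cases hgl : stack.getLast? with
    | none =>
      have hnil : stack = [] := List.getLast?_eq_none_iff.1 hgl
      subst hnil
      show (false = true ↔ _)
      simp
    | some pred =>
      obtain ⟨ys, rfl⟩ := List.getLast?_eq_some_iff.1 hgl
      rw [pvLoopA_concat]
      have hpredstack : pred ∈ ys ++ [pred] := List.mem_append_right _ (List.mem_singleton.2 rfl)
      by_cases hreqp : req.contains pred = true
      · rw [if_pos hreqp]
        simp only [true_iff]
        exact ⟨pred, List.contains_iff_mem.1 hreqp, pred, hpredstack, Relation.ReflTransGen.refl⟩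
      · have hpnreq : pred ∉ req := fun h => hreqp (List.contains_iff_mem.2 h)
        rw [if_neg hreqp]
        by_cases hseenp : seen.contains pred = true
        · have hpseen : pred ∈ seen := List.contains_iff_mem.1 hseenp
          rw [if_pos hseenp]
          have hcl' : ∀ x ∈ seen, ∀ y ∈ pvAdj d x, y ∈ seen ∨ y ∈ ys := by
            intro x hx y hy
            rcases hcl x hx y hy with h | h
            · exact Or.inl h
            · rcases List.mem_append.1 h with h | h
              · exact Or.inr h
              · exact Or.inl (List.mem_singleton.1 h ▸ hpseen)
          have hf' : pvMeasureA d seen ys ≤ fuel := by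
            unfold pvMeasureA at hf ⊢
            simp only [List.length_append, List.length_singleton] at hf
            omega
          rw [ih seen ys hcl' hreqs (fun s hs => hvals s (List.mem_append_left _ hs)) hf']
          constructor
          · rintro ⟨r, hr, s, hs, hrtg⟩
            exact ⟨r, hr, s, List.mem_append_left _ hs, hrtg⟩
          · rintro ⟨r, hr, s, hs, hrtg⟩
            rcases List.mem_append.1 hs with h | h
            · exact ⟨r, hr, s, h, hrtg⟩
            · obtain ⟨s', hs', hrtg'⟩ :=
                pv_escape d req seen ys hcl' hreqs s r hrtg hr (List.mem_singleton.1 h ▸ hpseen)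
              exact ⟨r, hr, s', hs', hrtg'⟩
        · have hpnseen : pred ∉ seen := fun h => hseenp (List.contains_iff_mem.2 h)
          rw [if_neg hseenp]
          have hcl' : ∀ x ∈ seen.add pred, ∀ y ∈ pvAdj d x, y ∈ seen.add pred ∨ y ∈ ys ++ pvAdj d pred := by
            intro x hx y hy
            rcases (PySem.Set.mem_add _ _ _).1 hx with hx | rfl
            · rcases hcl x hx y hy with h | h
              · exact Or.inl ((PySem.Set.mem_add _ _ _).2 (Or.inl h))
              · rcases List.mem_append.1 h with h | h
                · exact Or.inr (List.mem_append_left _ h)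
                · exact Or.inl ((PySem.Set.mem_add _ _ _).2 (Or.inr (List.mem_singleton.1 h)))
            · exact Or.inr (List.mem_append_right _ hy)
          have hreqs' : ∀ x ∈ seen.add pred, x ∉ req := by
            intro x hx
            rcases (PySem.Set.mem_add _ _ _).1 hx with hx | rfl
            · exact hreqs x hx
            · exact hpnreq
          have hvals' : ∀ s ∈ ys ++ pvAdj d pred, s ∈ pvVals d := by
            intro s hs
            rcases List.mem_append.1 hs with h | h
            · exact hvals s (List.mem_append_left _ h)
            · exact pvAdj_sub_vals d pred s h
          have hf' : pvMeasureA d (seen.add pred) (ys ++ pvAdj d pred) ≤ fuel := by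
            have hlt := pv_filter_lt (PySem.Set.ofList (pvVals d)) seen (seen.add pred)
              (fun x hx => (PySem.Set.mem_add _ _ _).2 (Or.inl hx)) pred
              ((PySem.Set.mem_ofList _ _).2 (hvals pred hpredstack))
              ((PySem.Set.mem_add _ _ _).2 (Or.inr rfl)) hpnseen
            have hadj := pvAdj_len_le d pred
            unfold pvMeasureA at hf ⊢
            simp only [List.length_append, List.length_singleton] at hf ⊢
            set c := ((PySem.Set.ofList (pvVals d)).filter (fun v => decide (v ∉ seen))).length with hc
            set c' := ((PySem.Set.ofList (pvVals d)).filter (fun v => decide (v ∉ seen.add pred))).length with hc'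
            have hmul : (c' + 1) * (pvEdges d + 2) ≤ c * (pvEdges d + 2) :=
              Nat.mul_le_mul_right _ hlt
            rw [Nat.add_mul, Nat.one_mul] at hmul
            omega
          rw [ih (seen.add pred) (ys ++ pvAdj d pred) hcl' hreqs' hvals' hf']
          constructor
          · rintro ⟨r, hr, s, hs, hrtg⟩
            rcases List.mem_append.1 hs with h | h
            · exact ⟨r, hr, s, List.mem_append_left _ h, hrtg⟩
            · exact ⟨r, hr, pred, hpredstack, Relation.ReflTransGen.head h hrtg⟩
          · rintro ⟨r, hr, s, hs, hrtg⟩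
            rcases List.mem_append.1 hs with h | h
            · exact ⟨r, hr, s, List.mem_append_left _ h, hrtg⟩
            · rw [List.mem_singleton.1 h] at hrtg
              rcases hrtg.cases_head with rfl | ⟨c, hc, hcr⟩
              · exact absurd hr hpnreq
              · exact ⟨r, hr, c, List.mem_append_right _ hc, hcr⟩

lemma pvA_iff (a : String) (req : List String) (d : List (String × List String)) :
    has_transitive_predecessor_py a req d = true ↔ pvGoal d req a := by
  unfold has_transitive_predecessor_py
  have hempty : ∀ x : String, x ∈ (PySem.Set.empty : PySem.Set String) → False := by
    intro x hx; cases hx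
  have hfuel : pvMeasureA d PySem.Set.empty (pvAdj d a)
      ≤ (pvEdges d + 1) * (pvEdges d + 2) + (pvAdj d a).length + 1 := by
    unfold pvMeasureA
    have hc : ((PySem.Set.ofList (pvVals d)).filter
        (fun v => decide (v ∉ (PySem.Set.empty : PySem.Set String)))).length ≤ pvEdges d + 1 := by
      calc _ ≤ (PySem.Set.ofList (pvVals d)).length := List.length_filter_le _ _
      _ ≤ (pvVals d).length := PySem.Set.length_ofList_le _
      _ = pvEdges d := pvVals_len d
      _ ≤ pvEdges d + 1 := Nat.le_succ _
    have := Nat.mul_le_mul_right (pvEdges d + 2) hc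
    omega
  rw [pvLoopA_correct d req _ PySem.Set.empty (pvAdj d a)
    (fun x hx => absurd hx (fun h => hempty x h))
    (fun x hx => absurd hx (fun h => hempty x h))
    (fun s hs => pvAdj_sub_vals d a s hs) hfuel]
  rfl

-- ---- B side ----
lemma pv_mem_foldl_union (d : List (String × List String)) (l : List String)
    (init : PySem.Set String) (y : String) :
    y ∈ l.foldl (fun acc n => PySem.Set.union acc (pvAdj d n)) init ↔
      y ∈ init ∨ ∃ n ∈ l, y ∈ pvAdj d n := by
  induction l generalizing init with
  | nil => simp
  | cons n tl ih =>
    simp only [List.foldl_cons]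
    rw [ih, PySem.Set.mem_union]
    simp only [List.mem_cons]
    constructor
    · rintro ((h | h) | ⟨m, hm, hym⟩)
      · exact Or.inl h
      · exact Or.inr ⟨n, Or.inl rfl, h⟩
      · exact Or.inr ⟨m, Or.inr hm, hym⟩
    · rintro (h | ⟨m, (rfl | hm), hym⟩)
      · exact Or.inl (Or.inl h)
      · exact Or.inl (Or.inr hym)
      · exact Or.inr ⟨m, hm, hym⟩

lemma pv_nodup_foldl_union (d : List (String × List String)) (l : List String)
    (init : PySem.Set String) (h : init.Nodup) :
    (l.foldl (fun acc n => PySem.Set.union acc (pvAdj d n)) init).Nodup := by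
  induction l generalizing init with
  | nil => exact h
  | cons n tl ih => exact ih _ (PySem.Set.nodup_union _ _ h)

lemma pv_mem_step (d : List (String × List String)) (r : PySem.Set String) (y : String) :
    y ∈ pvStep d r ↔ y ∈ r ∨ ∃ n ∈ r, y ∈ pvAdj d n := by
  unfold pvStep
  rw [pv_mem_foldl_union, PySem.Set.mem_ofList]

lemma pvLoopB_spec (d : List (String × List String)) (P : String → Prop)
    (hP : ∀ x, P x → ∀ y ∈ pvAdj d x, P y) :
    ∀ (fuel : Nat) (r : PySem.Set String), r.Nodup → (∀ x ∈ r, x ∈ pvVals d) →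
      (∀ x ∈ r, P x) →
      ((PySem.Set.ofList (pvVals d)).filter (fun v => decide (v ∉ r))).length < fuel →
      (∀ x ∈ r, x ∈ pvLoopB d fuel r) ∧
      (∀ x ∈ pvLoopB d fuel r, ∀ y ∈ pvAdj d x, y ∈ pvLoopB d fuel r) ∧
      (∀ x ∈ pvLoopB d fuel r, P x) := by
  intro fuel
  induction fuel with
  | zero => intro r _ _ _ hf; omega
  | succ fuel ih =>
    intro r hnd hvals hPr hf
    have hsubexp : ∀ x ∈ r, x ∈ pvStep d r := fun x hx => (pv_mem_step d r x).2 (Or.inl hx)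
    have hexpvals : ∀ x ∈ pvStep d r, x ∈ pvVals d := by
      intro x hx
      rcases (pv_mem_step d r x).1 hx with h | ⟨n, _, hxn⟩
      · exact hvals x h
      · exact pvAdj_sub_vals d n x hxn
    have hstep : pvLoopB d (fuel + 1) r
        = if PySem.Set.equal (pvStep d r) r then r else pvLoopB d fuel (pvStep d r) := rfl
    rw [hstep]
    by_cases heq : PySem.Set.equal (pvStep d r) r = true
    · have hexp_sub : ∀ x ∈ pvStep d r, x ∈ r := by
        unfold PySem.Set.equal at heq
        exact (PySem.Set.issubset_iff _ _).1 (Bool.and_eq_true _ _ ▸ heq |>.1)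
      rw [if_pos heq]
      refine ⟨fun x hx => hx, ?_, hPr⟩
      intro x hx y hy
      exact hexp_sub y ((pv_mem_step d r y).2 (Or.inr ⟨x, hx, hy⟩))
    · rw [if_neg heq]
      -- some element of the expansion is new
      have hwit : ∃ v ∈ pvStep d r, v ∉ r := by
        by_contra hno
        push Not at hno
        apply heq
        unfold PySem.Set.equal
        rw [Bool.and_eq_true, PySem.Set.issubset_iff, PySem.Set.issubset_iff]
        exact ⟨hno, hsubexp⟩
      obtain ⟨v, hv1, hv2⟩ := hwit
      have hlt := pv_filter_lt (PySem.Set.ofList (pvVals d)) r (pvStep d r) hsubexp v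
        ((PySem.Set.mem_ofList _ _).2 (hexpvals v hv1)) hv1 hv2
      have hnd' : (pvStep d r).Nodup := pv_nodup_foldl_union d r _ (PySem.Set.nodup_ofList r)
      have hPexp : ∀ x ∈ pvStep d r, P x := by
        intro x hx
        rcases (pv_mem_step d r x).1 hx with h | ⟨n, hn, hxn⟩
        · exact hPr x h
        · exact hP n (hPr n hn) x hxn
      obtain ⟨h1, h2, h3⟩ := ih (pvStep d r) hnd' hexpvals hPexp (by omega)
      exact ⟨fun x hx => h1 x (hsubexp x hx), h2, h3⟩

lemma pv_RTG_closed (d : List (String × List String)) (R : List String)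
    (hcl : ∀ x ∈ R, ∀ y ∈ pvAdj d x, y ∈ R) :
    ∀ z r, pvRTG d z r → z ∈ R → r ∈ R := by
  intro z r h
  induction h with
  | refl => exact id
  | tail _ e ih => exact fun hz => hcl _ (ih hz) _ e

lemma pvB_iff (a : String) (req : List String) (d : List (String × List String)) :
    has_transitive_predecessor_py_alt a req d = true ↔ pvGoal d req a := by
  unfold has_transitive_predecessor_py_alt
  have hP : ∀ x, (∃ z ∈ pvAdj d a, pvRTG d z x) → ∀ y ∈ pvAdj d x, ∃ z ∈ pvAdj d a, pvRTG d z y := by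
    rintro x ⟨z, hz, hzx⟩ y hy
    exact ⟨z, hz, hzx.tail hy⟩
  have hfuel : ((PySem.Set.ofList (pvVals d)).filter
      (fun v => decide (v ∉ PySem.Set.ofList (pvAdj d a)))).length < pvEdges d + 1 := by
    calc _ ≤ (PySem.Set.ofList (pvVals d)).length := List.length_filter_le _ _
    _ ≤ (pvVals d).length := PySem.Set.length_ofList_le _
    _ = pvEdges d := pvVals_len d
    _ < pvEdges d + 1 := Nat.lt_succ_self _
  obtain ⟨h1, h2, h3⟩ := pvLoopB_spec d (fun y => ∃ z ∈ pvAdj d a, pvRTG d z y) hP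
    (pvEdges d + 1) (PySem.Set.ofList (pvAdj d a)) (PySem.Set.nodup_ofList _)
    (fun x hx => pvAdj_sub_vals d a x ((PySem.Set.mem_ofList _ _).1 hx))
    (fun x hx => ⟨x, (PySem.Set.mem_ofList _ _).1 hx, Relation.ReflTransGen.refl⟩)
    hfuel
  rw [Bool.not_eq_true']
  rw [← Bool.not_eq_true, PySem.Set.isdisjoint_iff]
  unfold pvGoal
  push Not
  constructor
  · rintro ⟨x, hx, hxR⟩
    exact ⟨x, (PySem.Set.mem_ofList _ _).1 hx, h3 x hxR⟩
  · rintro ⟨x, hx, z, hz, hzx⟩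
    refine ⟨x, (PySem.Set.mem_ofList _ _).2 hx, ?_⟩
    exact pv_RTG_closed d _ h2 z x hzx (h1 z ((PySem.Set.mem_ofList _ _).2 hz))

-- ===== VERDICT (by name: the statement is the Claim_ definition above) =====
theorem has_transitive_predecessor_py_spec : Claim_equal_has_transitive_predecessor_py := by
  intro a req d _
  unfold Spec_has_transitive_predecessor_py
  rw [Bool.eq_iff_iff, pvA_iff, pvB_iff]
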